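-- pv_equiv track=rewrite | github.com/bakerwm/hipipe | demx.py | key_len
-- ===== SOURCE A (Python) =====
-- def key_len(d):
--     """Return the length of keys in dict
--     skip null, ''
--     """
--     assert isinstance(d, dict)
--     k = [len(i) for i in list(d.keys()) if len(i) > 0 and not i.upper() == 'NULL']
--     n = list(set(k))
--     if len(n) == 1:
--         return n[0]
--     else:
--         return None
-- ===== SOURCE B (Python) =====
-- def key_len(d):
--     """Return the length of keys in dict
--     skip null, ''
--     """
--     assert isinstance(d, dict)
--     common = None
--     for i in d.keys():
--         if len(i) == 0 or i.upper() == 'NULL':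
--             continue
--         n = len(i)
--         if common is None:
--             common = n
--         elif n != common:
--             return None
--     return common
-- ===== Notes on version B (the rewrite author's own statement) =====
-- stated objective: alternative
-- what changed: Replaces the materialized length list + set-cardinality test with a single pass keeping one scalar running length, returning None immediately on the first conflicting length.
import Mathlib
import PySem

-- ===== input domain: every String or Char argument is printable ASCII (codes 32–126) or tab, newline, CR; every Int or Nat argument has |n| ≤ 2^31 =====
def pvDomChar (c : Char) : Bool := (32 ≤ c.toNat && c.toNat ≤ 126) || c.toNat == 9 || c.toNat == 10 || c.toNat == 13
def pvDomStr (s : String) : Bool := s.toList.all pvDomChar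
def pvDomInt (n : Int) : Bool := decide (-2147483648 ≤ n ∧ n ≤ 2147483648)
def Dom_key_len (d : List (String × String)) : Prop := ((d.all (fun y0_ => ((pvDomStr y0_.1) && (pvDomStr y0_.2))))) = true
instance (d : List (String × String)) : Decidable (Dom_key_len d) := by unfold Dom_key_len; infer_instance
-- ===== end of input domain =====

-- B is an alternative single-pass rewrite: one scalar running length with early exit, instead of a length list deduplicated through a set.

-- ===== PORT A =====
-- the comprehension's filter condition `len(i) > 0 and not i.upper() == 'NULL'`
def pvKeep (i : String) : Bool := decide (PySem.Str.len i > 0) && !(PySem.Str.upper i == "NULL")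

def key_len (d : List (String × String)) : Option Int :=
  let k := ((PySem.Dict.ofList d).keys.filter pvKeep).map PySem.Str.len
  let n := PySem.Set.ofList k
  if n.length == 1 then PySem.List.pyGet? n 0 else none

-- ===== PORT B =====
-- the for-loop over d.keys() with the scalar accumulator `common`; returning none stops the loop (early return)
def pvGo (ks : List String) (common : Option Int) : Option Int :=
  match ks with
  | [] => common
  | i :: rest =>
    if (PySem.Str.len i == 0) || (PySem.Str.upper i == "NULL") then pvGo rest common
    else
      match common with
      | none => pvGo rest (some (PySem.Str.len i))
      | some c => if PySem.Str.len i != c then none else pvGo rest common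

def key_len_alt (d : List (String × String)) : Option Int :=
  pvGo (PySem.Dict.ofList d).keys none

-- ===== PRECONDITION & SPEC =====
def Spec_key_len (d : List (String × String)) (out : Option Int) : Prop := out = key_len_alt d
instance (d : List (String × String)) (out : Option Int) : Decidable (Spec_key_len d out) := by unfold Spec_key_len; infer_instance

-- ===== CLAIM (what is proved, stated in full; the proofs are below) =====
def Claim_equal_key_len : Prop := ∀ (d : List (String × String)), Dom_key_len d → Spec_key_len d (key_len d)

-- ===== LEMMAS AND PROOFS =====

lemma pvKeep_eq_not_skip (i : String) :
    pvKeep i = !((PySem.Str.len i == 0) || (PySem.Str.upper i == "NULL")) := by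
  have h : (0:Int) ≤ PySem.Str.len i := by
    rw [PySem.Str.len_eq]; exact Int.natCast_nonneg _
  unfold pvKeep
  rw [Bool.not_or]
  congr 1
  rcases eq_or_lt_of_le h with h1 | h1
  · have h2 : (PySem.Str.len i == 0) = true := beq_iff_eq.mpr h1.symm
    rw [h2, Bool.not_true]
    exact decide_eq_false (by omega)
  · have h2 : (PySem.Str.len i == 0) = false := beq_eq_false_iff_ne.mpr (by omega)
    rw [h2, Bool.not_false]
    exact decide_eq_true h1

lemma pvSkip_false_of_keep (i : String) (hk : pvKeep i = true) :
    ((PySem.Str.len i == 0) || (PySem.Str.upper i == "NULL")) = false := by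
  have := pvKeep_eq_not_skip i
  rw [hk] at this
  cases hsk : ((PySem.Str.len i == 0) || (PySem.Str.upper i == "NULL")) <;> simp_all

lemma pvSkip_true_of_not_keep (i : String) (hk : ¬ pvKeep i = true) :
    ((PySem.Str.len i == 0) || (PySem.Str.upper i == "NULL")) = true := by
  have := pvKeep_eq_not_skip i
  cases hsk : ((PySem.Str.len i == 0) || (PySem.Str.upper i == "NULL")) <;> simp_all

lemma pvGo_some (ks : List String) (c : Int) :
    pvGo ks (some c) =
      if (ks.filter pvKeep).all (fun i => PySem.Str.len i == c) then some c else none := by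
  induction ks with
  | nil => simp [pvGo]
  | cons i rest ih =>
    by_cases hk : pvKeep i = true
    · have hskip := pvSkip_false_of_keep i hk
      by_cases hc : PySem.Str.len i = c
      · have h1 : (PySem.Str.len i != c) = false := by rw [bne_eq_false_iff_eq]; exact hc
        have h2 : (PySem.Str.len i == c) = true := beq_iff_eq.mpr hc
        rw [show pvGo (i :: rest) (some c) = pvGo rest (some c) by
          simp only [pvGo, hskip, Bool.false_eq_true, if_false, h1]]
        rw [ih, List.filter_cons_of_pos hk, List.all_cons, h2, Bool.true_and]
      · have h1 : (PySem.Str.len i != c) = true := by rw [bne_iff_ne]; exact hc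
        have h2 : (PySem.Str.len i == c) = false := beq_eq_false_iff_ne.mpr hc
        rw [show pvGo (i :: rest) (some c) = none by
          simp only [pvGo, hskip, Bool.false_eq_true, if_false, h1, if_true]]
        rw [List.filter_cons_of_pos hk, List.all_cons, h2, Bool.false_and]
        rfl
    · have hskip := pvSkip_true_of_not_keep i hk
      rw [show pvGo (i :: rest) (some c) = pvGo rest (some c) by
        simp only [pvGo, hskip, if_true]]
      rw [ih, List.filter_cons_of_neg (by simpa using hk)]

lemma pvDiscard_eq_nil_iff (m : List Int) (c : Int) :
    PySem.Set.discard (PySem.Set.ofList m) c = [] ↔ ∀ y ∈ m, y = c := by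
  rw [List.eq_nil_iff_forall_not_mem]
  constructor
  · intro h y hy
    by_contra hne
    exact h y (by rw [PySem.Set.mem_discard]; exact ⟨by rw [PySem.Set.mem_ofList]; exact hy, hne⟩)
  · intro h y hy
    rw [PySem.Set.mem_discard, PySem.Set.mem_ofList] at hy
    exact hy.2 (h y hy.1)

lemma pvGo_none (ks : List String) :
    pvGo ks none =
      (let k := (ks.filter pvKeep).map PySem.Str.len
       let n := PySem.Set.ofList k
       if n.length == 1 then PySem.List.pyGet? n 0 else none) := by
  induction ks with
  | nil => simp [pvGo, PySem.Set.ofList_nil]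
  | cons i rest ih =>
    by_cases hk : pvKeep i = true
    · have hskip := pvSkip_false_of_keep i hk
      rw [show pvGo (i :: rest) none = pvGo rest (some (PySem.Str.len i)) by
        simp only [pvGo, hskip, Bool.false_eq_true, if_false]]
      rw [pvGo_some]
      dsimp only
      rw [List.filter_cons_of_pos hk, List.map_cons, PySem.Set.ofList_cons]
      by_cases hall : ∀ y ∈ (rest.filter pvKeep).map PySem.Str.len, y = PySem.Str.len i
      · have hd : PySem.Set.discard (PySem.Set.ofList ((rest.filter pvKeep).map PySem.Str.len)) (PySem.Str.len i) = [] :=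
          (pvDiscard_eq_nil_iff _ _).mpr hall
        have hall' : ((rest.filter pvKeep).all fun j => PySem.Str.len j == PySem.Str.len i) = true := by
          rw [List.all_eq_true]; intro j hj
          simpa using hall (PySem.Str.len j) (List.mem_map_of_mem hj)
        rw [hall', hd, if_pos rfl]
        simp
      · have hd : PySem.Set.discard (PySem.Set.ofList ((rest.filter pvKeep).map PySem.Str.len)) (PySem.Str.len i) ≠ [] := by
          intro h; exact hall ((pvDiscard_eq_nil_iff _ _).mp h)
        have hall' : ((rest.filter pvKeep).all fun j => PySem.Str.len j == PySem.Str.len i) = false := by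
          rw [Bool.eq_false_iff]
          intro h; apply hall
          intro y hy
          rcases List.mem_map.mp hy with ⟨j, hj, rfl⟩
          simpa using (List.all_eq_true.mp h) j hj
        have hlen : ((PySem.Str.len i :: PySem.Set.discard (PySem.Set.ofList ((rest.filter pvKeep).map PySem.Str.len)) (PySem.Str.len i)).length == 1) = false := by
          cases hcase : PySem.Set.discard (PySem.Set.ofList ((rest.filter pvKeep).map PySem.Str.len)) (PySem.Str.len i) with
          | nil => exact absurd hcase hd
          | cons a l => simp
        rw [hall', hlen]
        simp
    · have hskip := pvSkip_true_of_not_keep i hk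
      rw [show pvGo (i :: rest) none = pvGo rest none by
        simp only [pvGo, hskip, if_true]]
      rw [ih]
      dsimp only
      rw [List.filter_cons_of_neg (by simpa using hk)]

-- ===== VERDICT (by name: the statement is the Claim_ definition above) =====
theorem key_len_spec : Claim_equal_key_len := by
  intro d _
  unfold Spec_key_len key_len key_len_alt
  rw [pvGo_none]
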